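-- pv_equiv track=rewrite | github.com/bevvvvv/Spring2020Notebook | CMPSC442/HW2/jps6444.py | solve_disks
-- ===== SOURCE A (Python) =====
-- def create_disk_puzzle(length, n, distinct=False):
--     """Creates a list to represent a linear disk puzzle.
--     The list will be of size length and contain n disks.
--
--     :param length: size of puzzle
--     :param n: number of disks in puzzle
--
--     :return puzzle: list of binary values
--     """
--     if distinct:
--         return [i + 1 if i < n else 0 for i in range(length)] # index + 1 for distinct
--     return [1 if i < n else 0 for i in range(length)]
--
-- def expand_disk_puzzle(puzzle):
--     """Generator that will yield all possible successors of the current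
--     disk puzzle list.
--
--     :return (move, new_puzzle): a tuple with move as a (from, to) tuple representing
--     the disk moved and new_puzzle a list of the new puzzle
--     """
--     for i in range(len(puzzle)):
--         new_puzzle = puzzle[:]
--         if puzzle[i] == 0:
--             continue
--         if (i + 1) < len(puzzle) and puzzle[i + 1] == 0:
--             # adjacent space open
--             new_puzzle[i + 1] = new_puzzle[i]
--             new_puzzle[i] = 0
--             yield ((i, i + 1), new_puzzle)
--         elif (i + 2) < len(puzzle) and puzzle[i + 2] == 0:
--             # can jump
--             new_puzzle[i + 2] = new_puzzle[i]
--             new_puzzle[i] = 0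
--             yield ((i, i + 2), new_puzzle)
--         elif (i - 1) >= 0 and puzzle[i - 1] == 0:
--             # adjacent space open
--             new_puzzle[i - 1] = new_puzzle[i]
--             new_puzzle[i] = 0
--             yield ((i - 1, i), new_puzzle)
--         elif (i - 2) >= 0 and puzzle[i - 2] == 0:
--             # can jump
--             new_puzzle[i - 2] = new_puzzle[i]
--             new_puzzle[i] = 0
--             yield ((i - 2, i), new_puzzle)
--
-- def disk_puzzle_solved(puzzle, n, distinct=False):
--     """Checks to see if disk puzzle has been solved.
--
--     :param puzzle: puzzle state to check
--     :param distinct: boolean that determines goal state to check for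
--
--     :return is_solved: true if puzzle is solved; false otherwise
--     """
--     length = len(puzzle)
--     if distinct:
--         # order in distinct matters
--         return puzzle[(length - n):length] == [n - i for i in range(n)]
--     # checks to see disks are in last n spots
--     return sum(puzzle[(length - n):length]) == n
--
-- def solve_disks(length, n, distinct=False):
--     """Finds a solution to the disks puzzle such that the list of
--     (from, to) moves results in a valid states.
--     Uses breadth-first graph search, just like Lights Out Puzzle.
--
--     :return solution: a list of (from, to) tuple pairs that lead to a solution
--     """
--     moves_frontier = [[]] # match move sequences to states
--     frontier = [create_disk_puzzle(length, n, distinct)] # FIFO queue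
--     explored = [] # graph search must track explored board states
--     # here explored means expanded or in frontier
--
--     while len(frontier) > 0:
--         expand_state = frontier.pop(0)
--         expand_move = moves_frontier.pop(0)
--         next_level = expand_disk_puzzle(expand_state)
--         for move, puzzle in next_level:
--             # check if solution
--             new_moves = expand_move[:]
--             new_moves.append(move)
--             if disk_puzzle_solved(puzzle, n, distinct):
--                 return new_moves
--             puzzle_tuple = tuple(puzzle)
--             if puzzle_tuple in explored or puzzle_tuple in frontier:
--                 continue # state already found
--             # store move
--             moves_frontier.append(new_moves)
--             # add new state to frontier
--             explored.append(puzzle_tuple)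
--             frontier.append(puzzle)
--     return None
-- ===== SOURCE B (Python) =====
-- def create_disk_puzzle(length, n, distinct=False):
--     if distinct:
--         return [i + 1 if i < n else 0 for i in range(length)]
--     return [1 if i < n else 0 for i in range(length)]
--
-- def expand_disk_puzzle(puzzle):
--     for i in range(len(puzzle)):
--         new_puzzle = puzzle[:]
--         if puzzle[i] == 0:
--             continue
--         if (i + 1) < len(puzzle) and puzzle[i + 1] == 0:
--             new_puzzle[i + 1] = new_puzzle[i]
--             new_puzzle[i] = 0
--             yield ((i, i + 1), new_puzzle)
--         elif (i + 2) < len(puzzle) and puzzle[i + 2] == 0: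
--             new_puzzle[i + 2] = new_puzzle[i]
--             new_puzzle[i] = 0
--             yield ((i, i + 2), new_puzzle)
--         elif (i - 1) >= 0 and puzzle[i - 1] == 0:
--             new_puzzle[i - 1] = new_puzzle[i]
--             new_puzzle[i] = 0
--             yield ((i - 1, i), new_puzzle)
--         elif (i - 2) >= 0 and puzzle[i - 2] == 0:
--             new_puzzle[i - 2] = new_puzzle[i]
--             new_puzzle[i] = 0
--             yield ((i - 2, i), new_puzzle)
--
-- def disk_puzzle_solved(puzzle, n, distinct=False):
--     length = len(puzzle)
--     if distinct:
--         return puzzle[(length - n):length] == [n - i for i in range(n)]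
--     return sum(puzzle[(length - n):length]) == n
--
-- def solve_disks(length, n, distinct=False):
--     """BFS with an indexed queue, a hash set of visited state tuples, and a
--     parent map; the move list is reconstructed by walking parent links back
--     to the start instead of carrying a move list per state."""
--     start = create_disk_puzzle(length, n, distinct)
--     start_t = tuple(start)
--     queue = [start]
--     head = 0
--     visited = set()
--     parent = {}  # enqueued state tuple -> (move, predecessor state tuple)
--     while head < len(queue):
--         state = queue[head]
--         head += 1
--         state_t = tuple(state)
--         for move, nxt in expand_disk_puzzle(state):
--             if disk_puzzle_solved(nxt, n, distinct):
--                 moves = [move]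
--                 cur = state_t
--                 while cur != start_t:
--                     pmove, prev = parent[cur]
--                     moves.append(pmove)
--                     cur = prev
--                 moves.reverse()
--                 return moves
--             nxt_t = tuple(nxt)
--             if nxt_t in visited:
--                 continue
--             visited.add(nxt_t)
--             parent[nxt_t] = (move, state_t)
--             queue.append(nxt)
--     return None
-- ===== Notes on version B (the rewrite author's own statement) =====
-- stated objective: alternative
-- what changed: The BFS keeps the same FIFO order and successor generation, but replaces A's parallel per-state move-list queue, list-scan membership test and pop(0) with a parent map (state -> (move, predecessor)), a hash set of visited state tuples and an indexed dequeue; the solution move list is reconstructed once by walking parent links back to the start and reversing.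
import Mathlib
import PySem

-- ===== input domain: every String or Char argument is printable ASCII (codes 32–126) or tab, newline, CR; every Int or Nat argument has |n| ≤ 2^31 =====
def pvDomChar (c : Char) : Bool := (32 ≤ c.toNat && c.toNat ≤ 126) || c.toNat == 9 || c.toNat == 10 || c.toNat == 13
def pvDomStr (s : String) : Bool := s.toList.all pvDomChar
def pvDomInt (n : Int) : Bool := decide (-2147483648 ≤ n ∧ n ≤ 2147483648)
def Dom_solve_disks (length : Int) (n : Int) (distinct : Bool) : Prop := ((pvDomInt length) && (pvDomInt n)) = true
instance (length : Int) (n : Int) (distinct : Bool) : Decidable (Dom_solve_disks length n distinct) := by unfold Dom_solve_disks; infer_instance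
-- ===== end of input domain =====

-- B replaces A's parallel move-list queue, list-scan membership test and pop(0) by a parent
-- map, a visited set and an indexed dequeue; the move list is reconstructed from parent links.

-- ===== PORT A =====
-- helpers shared by both Pythons (create_disk_puzzle / expand_disk_puzzle / disk_puzzle_solved)

def create_disk_puzzle (length : Int) (n : Int) (distinct : Bool) : List Int :=
  if distinct then (PySem.List.pyRange 0 length 1).map (fun i => if i < n then i + 1 else 0)
  else (PySem.List.pyRange 0 length 1).map (fun i => if i < n then 1 else 0)

-- body of expand_disk_puzzle's loop for one index i (i < len, so puzzle[i] is p.getD i 0);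
-- the if/elif chain yields at most one successor per i, in the same order
def expandAt (p : List Int) (i : Nat) : Option ((Int × Int) × List Int) :=
  let v := p.getD i 0
  if v = 0 then none
  else if i + 1 < p.length ∧ p.getD (i + 1) 0 = 0 then
    some (((i : Int), (i : Int) + 1), (p.set (i + 1) v).set i 0)
  else if i + 2 < p.length ∧ p.getD (i + 2) 0 = 0 then
    some (((i : Int), (i : Int) + 2), (p.set (i + 2) v).set i 0)
  else if 1 ≤ i ∧ p.getD (i - 1) 0 = 0 then
    some (((i : Int) - 1, (i : Int)), (p.set (i - 1) v).set i 0)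
  else if 2 ≤ i ∧ p.getD (i - 2) 0 = 0 then
    some (((i : Int) - 2, (i : Int)), (p.set (i - 2) v).set i 0)
  else none

def expand_disk_puzzle (p : List Int) : List ((Int × Int) × List Int) :=
  (List.range p.length).filterMap (expandAt p)

def disk_puzzle_solved (p : List Int) (n : Int) (distinct : Bool) : Bool :=
  let length : Int := (p.length : Int)
  if distinct then
    PySem.List.slice p (some (length - n)) (some length) == (PySem.List.pyRange 0 n 1).map (fun i => n - i)
  else (PySem.List.slice p (some (length - n)) (some length)).sum == n

-- fuel for the while loops: both loops dequeue each enqueued state once, enqueued states are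
-- pairwise distinct lists of length L with entries in 0..L (plus the start, re-enqueued at most
-- once), so dequeues ≤ (L+1)^L + 2 and the 0-fuel branch is never reached
def pvFuelSD (length : Int) : Nat := (length.toNat + 1) ^ length.toNat + 2

-- A's inner `for move, puzzle in next_level` loop
def innerA (n : Int) (distinct : Bool) (m : List (Int × Int)) :
    List ((Int × Int) × List Int) → List (List Int) → List (List (Int × Int)) → List (List Int) →
    Sum (List (Int × Int)) (List (List Int) × List (List (Int × Int)) × List (List Int))
  | [], fr, mvs, ex => .inr (fr, mvs, ex)
  | (move, q) :: rest, fr, mvs, ex =>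
    let new_moves := m ++ [move]
    if disk_puzzle_solved q n distinct then .inl new_moves
    -- Python tests `puzzle_tuple in explored or puzzle_tuple in frontier`; the second test is
    -- vacuously False in Python (a tuple never equals a list), so only the first is ported
    else if q ∈ ex then innerA n distinct m rest fr mvs ex
    else innerA n distinct m rest (fr ++ [q]) (mvs ++ [new_moves]) (ex ++ [q])

-- A's `while len(frontier) > 0` loop (frontier, moves_frontier, explored)
def bfsA (n : Int) (distinct : Bool) :
    Nat → List (List Int) → List (List (Int × Int)) → List (List Int) → Option (List (Int × Int))
  | 0, _, _, _ => none              -- fuel exhausted: unreachable (see pvFuelSD)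
  | _ + 1, [], _, _ => none         -- while loop exits: return None
  | fuel + 1, e :: fr, m :: mvs, ex =>
    match innerA n distinct m (expand_disk_puzzle e) fr mvs ex with
    | .inl sol => some sol
    | .inr (fr', mvs', ex') => bfsA n distinct fuel fr' mvs' ex'
  | _ + 1, _ :: _, [], _ => none    -- unreachable: both queues always have equal length

def solve_disks (length : Int) (n : Int) (distinct : Bool) : Option (List (Int × Int)) :=
  bfsA n distinct (pvFuelSD length) [create_disk_puzzle length n distinct] [[]] []

-- ===== PORT B =====
-- B's reconstruction loop `while cur != start_t: pmove, prev = parent[cur]; moves.append(pmove)`;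
-- parent chains visit pairwise distinct keys, so fuel parent.size + 1 is never exhausted
def walkB (par : PySem.Dict (List Int) ((Int × Int) × List Int)) (start : List Int) :
    Nat → List Int → List (Int × Int) → Option (List (Int × Int))
  | 0, _, _ => none
  | fuel + 1, cur, acc =>
    if cur = start then some acc
    else match par.get? cur with
      | none => none                -- Python: KeyError; unreachable
      | some (pmove, prev) => walkB par start fuel prev (acc ++ [pmove])

-- B's inner `for move, nxt in expand_disk_puzzle(state)` loop
def innerB (n : Int) (distinct : Bool) (start state : List Int) :
    List ((Int × Int) × List Int) → List (List Int) → PySem.Set (List Int) →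
      PySem.Dict (List Int) ((Int × Int) × List Int) →
    Sum (Option (List (Int × Int)))
        (List (List Int) × PySem.Set (List Int) × PySem.Dict (List Int) ((Int × Int) × List Int))
  | [], queue, vis, par => .inr (queue, vis, par)
  | (move, nxt) :: rest, queue, vis, par =>
    if disk_puzzle_solved nxt n distinct then
      .inl ((walkB par start (par.size + 1) state [move]).map List.reverse)
    else if PySem.Set.contains vis nxt then innerB n distinct start state rest queue vis par
    else innerB n distinct start state rest (queue ++ [nxt]) (PySem.Set.add vis nxt)
           (par.insert nxt (move, state))

-- B's `while head < len(queue)` loop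
def bfsB (n : Int) (distinct : Bool) (start : List Int) :
    Nat → List (List Int) → Nat → PySem.Set (List Int) →
      PySem.Dict (List Int) ((Int × Int) × List Int) → Option (List (Int × Int))
  | 0, _, _, _, _ => none           -- fuel exhausted: unreachable (see pvFuelSD)
  | fuel + 1, queue, head, vis, par =>
    if head < queue.length then
      let state := queue.getD head []
      match innerB n distinct start state (expand_disk_puzzle state) queue vis par with
      | .inl res => res
      | .inr (queue', vis', par') => bfsB n distinct start fuel queue' (head + 1) vis' par'
    else none

def solve_disks_alt (length : Int) (n : Int) (distinct : Bool) : Option (List (Int × Int)) :=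
  let start := create_disk_puzzle length n distinct
  bfsB n distinct start (pvFuelSD length) [start] 0 PySem.Set.empty PySem.Dict.empty

-- ===== PRECONDITION & SPEC =====
def Spec_solve_disks (length : Int) (n : Int) (distinct : Bool) (out : Option (List (Int × Int))) : Prop := out = solve_disks_alt length n distinct
instance (length : Int) (n : Int) (distinct : Bool) (out : Option (List (Int × Int))) : Decidable (Spec_solve_disks length n distinct out) := by unfold Spec_solve_disks; infer_instance

-- ===== CLAIM (what is proved, stated in full; the proofs are below) =====
def Claim_equal_solve_disks : Prop := ∀ (length : Int) (n : Int) (distinct : Bool), Dom_solve_disks length n distinct → Spec_solve_disks length n distinct (solve_disks length n distinct)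

-- ===== LEMMAS AND PROOFS =====

-- abbreviation for B's parent map type (proof-side only)
def PMapSD : Type := PySem.Dict (List Int) ((Int × Int) × List Int)

-- "A's move list m for state s is what B's parent-link walk reconstructs"
def ReconOK (par : PMapSD) (start s : List Int) (m : List (Int × Int)) : Prop :=
  walkB par start (par.size + 1) s [] = some m.reverse

-- every parent link points back at the start or at an explored (hence keyed) state
def ClosureSD (par : PMapSD) (start : List Int) (ex : List (List Int)) : Prop :=
  ∀ kv ∈ par.items, kv.2.2 = start ∨ kv.2.2 ∈ ex

-- after the start state has been expanded once: none of its successors is solved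
-- and all of them are explored (so a re-enqueued copy of the start contributes nothing)
def StartDone (n : Int) (dist : Bool) (start : List Int) (ex : List (List Int)) : Prop :=
  ∀ mq ∈ expand_disk_puzzle start, disk_puzzle_solved mq.2 n dist = false ∧ mq.2 ∈ ex

theorem walk_fuel_succ (par : PMapSD) (start : List Int) :
    ∀ (fuel : Nat) (cur : List Int) (acc r : List (Int × Int)),
      walkB par start fuel cur acc = some r → walkB par start (fuel + 1) cur acc = some r := by
  intro fuel
  induction fuel with
  | zero => intro cur acc r h; simp [walkB] at h
  | succ f ih =>
    intro cur acc r h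
    unfold walkB at h ⊢
    by_cases hc : cur = start
    · simpa [hc] using h
    · simp only [hc, if_false] at h ⊢
      cases hg : par.get? cur with
      | none => rw [hg] at h; exact absurd h (by simp)
      | some pv =>
        obtain ⟨pm, prev⟩ := pv
        rw [hg] at h
        exact ih prev (acc ++ [pm]) r h

theorem walk_acc (par : PMapSD) (start : List Int) :
    ∀ (fuel : Nat) (cur : List Int) (acc : List (Int × Int)),
      walkB par start fuel cur acc = (walkB par start fuel cur []).map (fun t => acc ++ t) := by
  intro fuel
  induction fuel with
  | zero => intro cur acc; simp [walkB]
  | succ f ih =>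
    intro cur acc
    unfold walkB
    by_cases hc : cur = start
    · simp [hc]
    · simp only [hc, if_false]
      cases hg : par.get? cur with
      | none => simp
      | some pv =>
        obtain ⟨pm, prev⟩ := pv
        show walkB par start f prev (acc ++ [pm])
          = Option.map (fun t => acc ++ t) (walkB par start f prev ([] ++ [pm]))
        rw [ih prev (acc ++ [pm]), ih prev ([] ++ [pm])]
        cases walkB par start f prev [] <;> simp

theorem walk_insert_fresh (par : PMapSD) (start : List Int) (ex : List (List Int))
    (k : List Int) (v : (Int × Int) × List Int)
    (hk : k ∉ ex) (hcl : ClosureSD par start ex) :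
    ∀ (fuel : Nat) (cur : List Int) (acc r : List (Int × Int)),
      (cur = start ∨ cur ∈ ex) →
      walkB par start fuel cur acc = some r →
      walkB (par.insert k v) start fuel cur acc = some r := by
  intro fuel
  induction fuel with
  | zero => intro cur acc r _ h; simp [walkB] at h
  | succ f ih =>
    intro cur acc r hcur h
    unfold walkB at h ⊢
    by_cases hc : cur = start
    · simpa [hc] using h
    · simp only [hc, if_false] at h ⊢
      have hcex : cur ∈ ex := hcur.resolve_left hc
      have hne : cur ≠ k := fun he => hk (he ▸ hcex)
      rw [PySem.Dict.get?_insert_of_ne par v hne]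
      cases hg : par.get? cur with
      | none => rw [hg] at h; exact absurd h (by simp)
      | some pv =>
        obtain ⟨pm, prev⟩ := pv
        rw [hg] at h
        have hmem : (cur, (pm, prev)) ∈ par.items := PySem.Dict.mem_items_of_get?_eq_some par hg
        have hprev : prev = start ∨ prev ∈ ex := hcl (cur, (pm, prev)) hmem
        exact ih prev (acc ++ [pm]) r hprev h

theorem size_insert_fresh (par : PMapSD) (k : List Int) (v : (Int × Int) × List Int)
    (hk : par.contains k = false) : (par.insert k v).size = par.size + 1 := by
  show (par.insert k v).items.length = par.items.length + 1
  rw [PySem.Dict.items_insert_of_not_contains par v hk]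
  simp

theorem not_contains_of_not_mem (par : PMapSD) (ex : List (List Int)) (k : List Int)
    (hkeys : par.keys = ex) (hk : k ∉ ex) : par.contains k = false := by
  rw [← Bool.not_eq_true, PySem.Dict.contains_iff_mem_keys par k, hkeys]; exact hk

theorem recon_insert_fresh (par : PMapSD) (start : List Int) (ex : List (List Int))
    (k : List Int) (v : (Int × Int) × List Int) (s : List Int) (m : List (Int × Int))
    (hkeys : par.keys = ex) (hk : k ∉ ex) (hcl : ClosureSD par start ex)
    (hs : s = start ∨ s ∈ ex) (h : ReconOK par start s m) :
    ReconOK (par.insert k v) start s m := by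
  unfold ReconOK at h ⊢
  rw [size_insert_fresh par k v (not_contains_of_not_mem par ex k hkeys hk)]
  exact walk_fuel_succ _ _ _ _ _ _
    (walk_insert_fresh par start ex k v hk hcl (par.size + 1) s [] m.reverse hs h)

theorem recon_new (par : PMapSD) (start : List Int) (ex : List (List Int))
    (q s : List Int) (move : Int × Int) (m : List (Int × Int))
    (hkeys : par.keys = ex) (hq : q ∉ ex) (hqs : q ≠ start) (hcl : ClosureSD par start ex)
    (hs : s = start ∨ s ∈ ex) (h : ReconOK par start s m) :
    ReconOK (par.insert q (move, s)) start q (m ++ [move]) := by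
  unfold ReconOK at h ⊢
  rw [size_insert_fresh par q (move, s) (not_contains_of_not_mem par ex q hkeys hq)]
  show walkB (par.insert q (move, s)) start (par.size + 1 + 1) q [] = some (m ++ [move]).reverse
  unfold walkB
  rw [if_neg hqs, PySem.Dict.get?_insert_self]
  show walkB (par.insert q (move, s)) start (par.size + 1) s ([] ++ [move])
      = some (m ++ [move]).reverse
  have h2 : walkB par start (par.size + 1) s ([] ++ [move]) = some ([move] ++ m.reverse) := by
    rw [walk_acc par start (par.size + 1) s ([] ++ [move]), h]; simp
  rw [walk_insert_fresh par start ex q (move, s) hq hcl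
      (par.size + 1) s ([] ++ [move]) ([move] ++ m.reverse) hs h2]
  simp

theorem f2_insert (par : PMapSD) (start : List Int) (ex : List (List Int))
    (q : List Int) (v : (Int × Int) × List Int)
    (hkeys : par.keys = ex) (hq : q ∉ ex) (hcl : ClosureSD par start ex) :
    ∀ (mvs : List (List (Int × Int))) (fr : List (List Int)),
      List.Forall₂ (fun mm s => ReconOK par start s mm ∨ s = start) mvs fr →
      (∀ s ∈ fr, s = start ∨ s ∈ ex) →
      List.Forall₂ (fun mm s => ReconOK (par.insert q v) start s mm ∨ s = start) mvs fr := by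
  intro mvs fr h
  induction h with
  | nil => intro _; exact .nil
  | @cons mm s mvs' fr' hp _ ihr =>
    intro hfm
    refine .cons ?_ (ihr fun x hx => hfm x (List.mem_cons_of_mem _ hx))
    rcases hp with h' | h'
    · exact Or.inl (recon_insert_fresh par start ex q v s mm hkeys hq hcl
        (hfm s (List.mem_cons_self ..)) h')
    · exact Or.inr h'

-- lockstep of one pass over the successor list of the expanded state e
theorem innerEq (n : Int) (dist : Bool) (start e : List Int) (m : List (Int × Int)) (h1 : Nat) :
    ∀ (ls : List ((Int × Int) × List Int)) (fr : List (List Int))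
      (mvs : List (List (Int × Int))) (ex queue : List (List Int)) (par : PMapSD),
      queue.drop h1 = fr → h1 ≤ queue.length →
      par.keys = ex → ex.Nodup → ClosureSD par start ex →
      List.Forall₂ (fun mm s => ReconOK par start s mm ∨ s = start) mvs fr →
      (∀ s ∈ fr, s = start ∨ s ∈ ex) →
      (e = start ∨ e ∈ ex) →
      (ReconOK par start e m ∨
        ∀ mq ∈ ls, disk_puzzle_solved mq.2 n dist = false ∧ mq.2 ∈ ex) →
      (∀ mq ∈ expand_disk_puzzle start,
        mq ∈ ls ∨ (disk_puzzle_solved mq.2 n dist = false ∧ mq.2 ∈ ex)) →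
      (∃ sol, innerA n dist m ls fr mvs ex = .inl sol ∧
              innerB n dist start e ls queue ex par = .inl (some sol)) ∨
      (∃ fr' mvs' ex' queue' par',
        innerA n dist m ls fr mvs ex = .inr (fr', mvs', ex') ∧
        innerB n dist start e ls queue ex par = .inr (queue', ex', par') ∧
        queue'.drop h1 = fr' ∧ h1 ≤ queue'.length ∧
        par'.keys = ex' ∧ ex'.Nodup ∧ ClosureSD par' start ex' ∧
        List.Forall₂ (fun mm s => ReconOK par' start s mm ∨ s = start) mvs' fr' ∧
        (∀ s ∈ fr', s = start ∨ s ∈ ex') ∧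
        StartDone n dist start ex') := by
  intro ls
  induction ls with
  | nil =>
    intro fr mvs ex queue par hdrop hle hkeys hnd hcl hf2 hfm he hrec hsd
    right
    refine ⟨fr, mvs, ex, queue, par, rfl, rfl, hdrop, hle, hkeys, hnd, hcl, hf2, hfm, ?_⟩
    intro mq hmq
    rcases hsd mq hmq with h | h
    · simp at h
    · exact h
  | cons hd rest ih =>
    intro fr mvs ex queue par hdrop hle hkeys hnd hcl hf2 hfm he hrec hsd
    obtain ⟨move, q⟩ := hd
    by_cases hsol : disk_puzzle_solved q n dist = true
    · -- solution found: A returns m ++ [move], B reconstructs the same list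
      left
      have hrecE : ReconOK par start e m := by
        rcases hrec with h | h
        · exact h
        · have := (h (move, q) (List.mem_cons_self ..)).1
          rw [this] at hsol; cases hsol
      refine ⟨m ++ [move], by simp [innerA, hsol], ?_⟩
      simp only [innerB, hsol, if_true]
      have h2 : walkB par start (par.size + 1) e [move] = some ([move] ++ m.reverse) := by
        have := walk_acc par start (par.size + 1) e [move]
        rw [this, hrecE]; simp
      rw [h2]
      simp
    · by_cases hmem : q ∈ ex
      · -- already explored: both sides skip
        have hbc : PySem.Set.contains ex q = true := by
          simp only [PySem.Set.contains]; simp [hmem]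
        have hres := ih fr mvs ex queue par hdrop hle hkeys hnd hcl hf2 hfm he
          (by rcases hrec with h | h
              · exact Or.inl h
              · exact Or.inr fun mq hmq => h mq (List.mem_cons_of_mem _ hmq))
          (by intro mq hmq
              rcases hsd mq hmq with h | h
              · rcases List.mem_cons.mp h with h' | h'
                · exact Or.inr ⟨by rw [h']; simpa using hsol, by rw [h']; exact hmem⟩
                · exact Or.inl h'
              · exact Or.inr h)
        have hA : innerA n dist m ((move, q) :: rest) fr mvs ex
            = innerA n dist m rest fr mvs ex := by
          simp [innerA, hsol, hmem]
        have hB : innerB n dist start e ((move, q) :: rest) queue ex par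
            = innerB n dist start e rest queue ex par := by
          simp [innerB, hsol, hmem]
        rw [hA, hB]; exact hres
      · -- new state: both sides enqueue q
        have hbc : PySem.Set.contains ex q = false := by
          rw [← Bool.not_eq_true]; simp only [PySem.Set.contains]; simp [hmem]
        have hadd : PySem.Set.add ex q = ex ++ [q] := by
          simp [PySem.Set.add, PySem.Set.contains, hmem]
        have hrecE : ReconOK par start e m := by
          rcases hrec with h | h
          · exact h
          · exact absurd (h (move, q) (List.mem_cons_self ..)).2 hmem
        have hA : innerA n dist m ((move, q) :: rest) fr mvs ex
            = innerA n dist m rest (fr ++ [q]) (mvs ++ [m ++ [move]]) (ex ++ [q]) := by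
          simp [innerA, hsol, hmem]
        have hB : innerB n dist start e ((move, q) :: rest) queue ex par
            = innerB n dist start e rest (queue ++ [q]) (ex ++ [q]) (par.insert q (move, e)) := by
          simp [innerB, hsol, hmem]
        rw [hA, hB]
        refine ih (fr ++ [q]) (mvs ++ [m ++ [move]]) (ex ++ [q]) (queue ++ [q])
          (par.insert q (move, e)) ?_ ?_ ?_ ?_ ?_ ?_ ?_ ?_ ?_ ?_
        · rw [List.drop_append_of_le_length hle, hdrop]
        · exact le_trans hle (by simp)
        · rw [PySem.Dict.keys_insert_of_not_contains par (move, e)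
            (not_contains_of_not_mem par ex q hkeys hmem), hkeys]
        · simp [List.Nodup.append, hnd, hmem]
        · intro kv hkv
          rw [PySem.Dict.items_insert_of_not_contains par (move, e)
            (not_contains_of_not_mem par ex q hkeys hmem)] at hkv
          rcases List.mem_append.mp hkv with h | h
          · rcases hcl kv h with h' | h'
            · exact Or.inl h'
            · exact Or.inr (List.mem_append_left _ h')
          · have hkv2 : kv.2.2 = e := by
              simp at h; rw [h]
            rcases he with h' | h'
            · exact Or.inl (hkv2 ▸ h')
            · exact Or.inr (hkv2 ▸ List.mem_append_left _ h')
        · refine List.rel_append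
            (f2_insert par start ex q (move, e) hkeys hmem hcl mvs fr hf2 hfm) ?_
          refine .cons ?_ .nil
          by_cases hqs : q = start
          · exact Or.inr hqs
          · exact Or.inl (recon_new par start ex q e move m hkeys hmem hqs hcl he hrecE)
        · intro s hs
          rcases List.mem_append.mp hs with h | h
          · rcases hfm s h with h' | h'
            · exact Or.inl h'
            · exact Or.inr (List.mem_append_left _ h')
          · exact Or.inr (List.mem_append_right _ h)
        · rcases he with h | h
          · exact Or.inl h
          · exact Or.inr (List.mem_append_left _ h)
        · exact Or.inl (recon_insert_fresh par start ex q (move, e) e m hkeys hmem hcl he hrecE)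
        · intro mq hmq
          rcases hsd mq hmq with h | h
          · rcases List.mem_cons.mp h with h' | h'
            · refine Or.inr ⟨by rw [h']; simpa using hsol, ?_⟩
              rw [h']; exact List.mem_append_right _ (List.mem_singleton.mpr rfl)
            · exact Or.inl h'
          · exact Or.inr ⟨h.1, List.mem_append_left _ h.2⟩

-- lockstep of the two while loops
theorem bfs_eq (n : Int) (dist : Bool) (start : List Int) :
    ∀ (fuel : Nat) (fr : List (List Int)) (mvs : List (List (Int × Int)))
      (ex queue : List (List Int)) (head : Nat) (par : PMapSD),
      queue.drop head = fr →
      par.keys = ex → ex.Nodup → ClosureSD par start ex →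
      List.Forall₂ (fun mm s => ReconOK par start s mm ∨ s = start) mvs fr →
      (∀ s ∈ fr, s = start ∨ s ∈ ex) →
      (StartDone n dist start ex ∨ (fr = [start] ∧ mvs = [[]] ∧ par = PySem.Dict.empty)) →
      bfsA n dist fuel fr mvs ex = bfsB n dist start fuel queue head ex par := by
  intro fuel
  induction fuel with
  | zero => intro fr mvs ex queue head par _ _ _ _ _ _ _; rfl
  | succ f ih =>
    intro fr mvs ex queue head par hdrop hkeys hnd hcl hf2 hfm hSD
    cases hf2 with
    | nil =>
      have hge : queue.length ≤ head := List.drop_eq_nil_iff.mp hdrop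
      simp [bfsA, bfsB, Nat.not_lt.mpr hge]
    | @cons mm e mvs' fr' hp hrest =>
      have hlt : head < queue.length := by
        by_contra hge
        rw [List.drop_eq_nil_iff.mpr (Nat.le_of_not_lt hge)] at hdrop
        cases hdrop
      have hstate : queue.getD head [] = e := by
        rw [List.getD_eq_getElem?_getD]
        have h0 : queue[head]? = (queue.drop head)[0]? := by
          simp [List.getElem?_drop]
        rw [h0, hdrop]; rfl
      have hdrop' : queue.drop (head + 1) = fr' := by
        have h0 : queue.drop (head + 1) = (queue.drop head).drop 1 := by
          rw [List.drop_drop]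
        rw [h0, hdrop]; rfl
      have hle' : head + 1 ≤ queue.length := hlt
      have heM : e = start ∨ e ∈ ex := hfm e (List.mem_cons_self ..)
      -- choose the reconstruction/skip disjunct and the partial-StartDone hypothesis
      have hrec : ReconOK par start e mm ∨
          ∀ mq ∈ expand_disk_puzzle e, disk_puzzle_solved mq.2 n dist = false ∧ mq.2 ∈ ex := by
        rcases hSD with hS | ⟨hfr0, hmv0, hpar0⟩
        · rcases hp with h | h
          · exact Or.inl h
          · exact Or.inr (by rw [h]; intro mq hmq; exact hS mq hmq)
        · left
          obtain ⟨he', -⟩ := List.cons.injEq .. ▸ hfr0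
          obtain ⟨hm', -⟩ := List.cons.injEq .. ▸ hmv0
          rw [he', hm', hpar0]
          simp [ReconOK, walkB]
      have hsd : ∀ mq ∈ expand_disk_puzzle start,
          mq ∈ expand_disk_puzzle e ∨ (disk_puzzle_solved mq.2 n dist = false ∧ mq.2 ∈ ex) := by
        rcases hSD with hS | ⟨hfr0, -, -⟩
        · exact fun mq hmq => Or.inr (hS mq hmq)
        · obtain ⟨he', -⟩ := List.cons.injEq .. ▸ hfr0
          rw [he']
          exact fun mq hmq => Or.inl hmq
      have hmain := innerEq n dist start e mm (head + 1) (expand_disk_puzzle e) fr' mvs' ex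
        queue par hdrop' hle' hkeys hnd hcl hrest
        (fun s hs => hfm s (List.mem_cons_of_mem _ hs)) heM hrec hsd
      rcases hmain with ⟨sol, hA1, hB1⟩ |
        ⟨fr'', mvs'', ex'', queue'', par'', hA1, hB1, hd2, hl2, hk2, hn2, hc2, hf22, hfm2, hSD2⟩
      · simp only [bfsA, bfsB, hlt, if_true, hstate]
        rw [hA1, hB1]
      · simp only [bfsA, bfsB, hlt, if_true, hstate]
        rw [hA1, hB1]
        exact ih fr'' mvs'' ex'' queue'' (head + 1) par'' hd2 hk2 hn2 hc2 hf22 hfm2 (Or.inl hSD2)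

-- ===== VERDICT (by name: the statement is the Claim_ definition above) =====
theorem solve_disks_spec : Claim_equal_solve_disks := by
  intro length n distinct _
  show solve_disks length n distinct = solve_disks_alt length n distinct
  unfold solve_disks solve_disks_alt
  exact bfs_eq n distinct (create_disk_puzzle length n distinct) (pvFuelSD length)
    [create_disk_puzzle length n distinct] [[]] [] [create_disk_puzzle length n distinct] 0
    PySem.Dict.empty rfl rfl List.nodup_nil (fun kv hkv => by rw [show (PySem.Dict.empty : PMapSD).items = [] from rfl] at hkv; cases hkv)
    (.cons (Or.inr rfl) .nil)
    (fun s hs => Or.inl (List.mem_singleton.mp hs))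
    (Or.inr ⟨rfl, rfl, rfl⟩)
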